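-- pv_equiv track=rewrite | github.com/aquarellian/adventofcode2018 | out/production/adventofcode2018/task29.py | choose_target
-- ===== SOURCE A (Python) =====
-- def choose_target(player_field, target_locations):
--     reachable_locations = {}
--     for enemy, locations in target_locations.items():
--         for location in locations:
--             dist = player_field[location[1]][location[0]]
--             if reachable_locations.get(dist, None) is None:
--                 reachable_locations[dist] = []
--             reachable_locations[dist].append(location)
--
--     min_dist = min(reachable_locations.keys())
--     if min_dist < 10000000:
--         options = reachable_locations[min_dist]
--         options = sorted(options, key=lambda p: p[0]) # sort by x
--         options = sorted(options, key=lambda p: p[1]) # sort by y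
--
--         return options[0][0], options[0][1]
--     else:
--         return None, None
-- ===== SOURCE B (Python) =====
-- def choose_target(player_field, target_locations):
--     d, y, x = min((player_field[y][x], y, x)
--                   for locs in target_locations.values()
--                   for x, y in locs)
--     if d < 10000000:
--         return x, y
--     return None, None
-- ===== Notes on version B (the rewrite author's own statement) =====
-- stated objective: simpler
-- what changed: Drops the dist-keyed grouping dict and the two stable sorts; one pass takes min over (dist, y, x) tuples, which encodes the same nearest-then-y-then-x choice.
import Mathlib
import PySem

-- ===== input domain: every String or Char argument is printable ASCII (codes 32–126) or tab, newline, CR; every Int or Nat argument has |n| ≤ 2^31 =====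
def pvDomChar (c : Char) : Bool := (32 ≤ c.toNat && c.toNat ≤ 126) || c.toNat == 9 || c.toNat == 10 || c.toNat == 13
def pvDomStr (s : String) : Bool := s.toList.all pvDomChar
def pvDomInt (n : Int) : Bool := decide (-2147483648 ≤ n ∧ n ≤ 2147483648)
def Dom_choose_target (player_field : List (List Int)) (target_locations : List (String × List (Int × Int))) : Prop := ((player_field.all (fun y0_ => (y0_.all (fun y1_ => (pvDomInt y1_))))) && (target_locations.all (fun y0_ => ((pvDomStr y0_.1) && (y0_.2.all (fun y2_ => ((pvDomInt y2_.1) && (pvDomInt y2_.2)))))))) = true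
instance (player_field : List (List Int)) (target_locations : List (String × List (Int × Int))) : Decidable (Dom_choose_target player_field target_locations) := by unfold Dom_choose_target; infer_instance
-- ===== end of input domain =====

-- B drops A's dist-keyed grouping dict and the two stable sorts: one pass takes the minimum
-- (dist, y, x) tuple, which encodes the same nearest-then-y-then-x choice (return value only; no mutation).

-- ===== PORT A =====
-- dist = player_field[location[1]][location[0]]  — Python indexing (negative wrap); exact on Pre_,
-- which excludes out-of-range indices (IndexError); the defaults are never used inside Pre_.
def pvDist (player_field : List (List Int)) (loc : Int × Int) : Int :=
  PySem.List.pyGetD (PySem.List.pyGetD player_field loc.2 []) loc.1 0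

-- the body of A's inner for-loop (named so the lemmas can speak about it)
def pvStepA (player_field : List (List Int)) (d : PySem.Dict Int (List (Int × Int))) (loc : Int × Int) :
    PySem.Dict Int (List (Int × Int)) :=
  let dist := pvDist player_field loc
  let d := if d.get? dist = none then d.insert dist [] else d
  d.modify dist [] (fun l => l ++ [loc])

def choose_target (player_field : List (List Int)) (target_locations : List (String × List (Int × Int))) : Option Int × Option Int :=
  let rl : PySem.Dict Int (List (Int × Int)) :=
    target_locations.foldl (fun d p => p.2.foldl (pvStepA player_field) d) PySem.Dict.empty
  match PySem.List.min? rl.keys (fun k => k) with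
  | none => (none, none)  -- Python: min() of an empty dict raises ValueError; excluded by Pre_
  | some min_dist =>
    if min_dist < 10000000 then
      let options := PySem.List.sorted (rl.getD min_dist []) (fun p => p.1) false  -- sort by x
      let options := PySem.List.sorted options (fun p => p.2) false                -- sort by y
      match options with
      | [] => (none, none)  -- unreachable: min_dist is a key, so its group is nonempty
      | o :: _ => (some o.1, some o.2)
    else (none, none)

-- ===== PORT B =====
-- Python's '<' on int triples (lexicographic), ported by hand: exact.
def pvLt3 (a b : Int × Int × Int) : Bool :=
  a.1 < b.1 || (a.1 == b.1 && (a.2.1 < b.2.1 || (a.2.1 == b.2.1 && a.2.2 < b.2.2)))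

def choose_target_alt (player_field : List (List Int)) (target_locations : List (String × List (Int × Int))) : Option Int × Option Int :=
  let cands := target_locations.flatMap (fun p => p.2.map (fun loc => (pvDist player_field loc, loc.2, loc.1)))
  match cands with
  | [] => (none, none)  -- Python: min() of an empty generator raises ValueError; excluded by Pre_
  | c :: rest =>
    let best := rest.foldl (fun b c => if pvLt3 c b then c else b) c  -- min(...) keeps the first minimum
    if best.1 < 10000000 then (some best.2.2, some best.2.1) else (none, none)

-- ===== PRECONDITION & SPEC =====
-- Pre_ excludes exactly the inputs on which the Python raises: an out-of-range grid index
-- (IndexError in both A and B) and the no-locations-at-all case (min() raises ValueError in both).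
def Pre_choose_target (player_field : List (List Int)) (target_locations : List (String × List (Int × Int))) : Prop :=
  (∀ p ∈ target_locations, ∀ loc ∈ p.2,
      (PySem.List.pyGet? player_field loc.2).isSome = true ∧
      (PySem.List.pyGet? (PySem.List.pyGetD player_field loc.2 []) loc.1).isSome = true) ∧
  (∃ p ∈ target_locations, p.2 ≠ [])
instance (player_field : List (List Int)) (target_locations : List (String × List (Int × Int))) : Decidable (Pre_choose_target player_field target_locations) := by unfold Pre_choose_target; infer_instance

def pvWitness_choose_target : List (List Int) × (List (String × List (Int × Int))) :=
  ([[5]], [("G", [(0, 0)])])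

def Spec_choose_target (player_field : List (List Int)) (target_locations : List (String × List (Int × Int))) (out : Option Int × Option Int) : Prop := out = choose_target_alt player_field target_locations
instance (player_field : List (List Int)) (target_locations : List (String × List (Int × Int))) (out : Option Int × Option Int) : Decidable (Spec_choose_target player_field target_locations out) := by unfold Spec_choose_target; infer_instance

-- ===== CLAIM (what is proved, stated in full; the proofs are below) =====
def Claim_equal_choose_target : Prop := ∀ (player_field : List (List Int)) (target_locations : List (String × List (Int × Int))), Dom_choose_target player_field target_locations → Pre_choose_target player_field target_locations → Spec_choose_target player_field target_locations (choose_target player_field target_locations)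

-- ===== LEMMAS AND PROOFS =====

-- lex (y, then x) order on locations (x, y)
def pvLeYX (a b : Int × Int) : Prop := a.2 < b.2 ∨ (a.2 = b.2 ∧ a.1 ≤ b.1)

-- lex order on triples, the Prop counterpart of pvLt3's reflexive closure
def pvLe3 (a b : Int × Int × Int) : Prop :=
  a.1 < b.1 ∨ (a.1 = b.1 ∧ (a.2.1 < b.2.1 ∨ (a.2.1 = b.2.1 ∧ a.2.2 ≤ b.2.2)))

theorem pvStepA_getD (pf : List (List Int)) (d : PySem.Dict Int (List (Int × Int)))
    (loc : Int × Int) (k : Int) :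
    (pvStepA pf d loc).getD k [] =
      if pvDist pf loc = k then d.getD k [] ++ [loc] else d.getD k [] := by
  unfold pvStepA
  by_cases hk : pvDist pf loc = k
  · subst hk
    by_cases h : d.get? (pvDist pf loc) = none
    · rw [PySem.Dict.getD_modify_self, if_pos h, PySem.Dict.getD_insert_self,
          PySem.Dict.getD_eq_get?_getD d, h, if_pos rfl]
      rfl
    · simp [h, PySem.Dict.getD_modify_self]
  · have hk' : k ≠ pvDist pf loc := fun h' => hk h'.symm
    by_cases h : d.get? (pvDist pf loc) = none <;>
      simp [h, hk, hk', PySem.Dict.getD_modify, PySem.Dict.getD_insert]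

theorem pvStepA_mem_keys (pf : List (List Int)) (d : PySem.Dict Int (List (Int × Int)))
    (loc : Int × Int) (k : Int) :
    k ∈ (pvStepA pf d loc).keys ↔ k = pvDist pf loc ∨ k ∈ d.keys := by
  unfold pvStepA
  by_cases h : d.get? (pvDist pf loc) = none
  · simp [h, PySem.Dict.keys_modify, PySem.Dict.mem_keys_insert]
  · simp [h, PySem.Dict.keys_modify, PySem.Dict.mem_keys_insert]

theorem pvFoldA_getD (pf : List (List Int)) (cs : List (Int × Int))
    (d : PySem.Dict Int (List (Int × Int))) (k : Int) :
    (cs.foldl (pvStepA pf) d).getD k [] =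
      d.getD k [] ++ cs.filter (fun c => decide (pvDist pf c = k)) := by
  induction cs generalizing d with
  | nil => simp
  | cons c cs ih =>
    simp only [List.foldl_cons, List.filter_cons, ih, pvStepA_getD]
    by_cases h : pvDist pf c = k <;> simp [h]

theorem pvFoldA_mem_keys (pf : List (List Int)) (cs : List (Int × Int))
    (d : PySem.Dict Int (List (Int × Int))) (k : Int) :
    k ∈ (cs.foldl (pvStepA pf) d).keys ↔ k ∈ d.keys ∨ k ∈ cs.map (pvDist pf) := by
  induction cs generalizing d with
  | nil => simp
  | cons c cs ih =>
    simp only [List.foldl_cons, ih, pvStepA_mem_keys, List.map_cons, List.mem_cons]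
    tauto

theorem pvFoldA_flatten (pf : List (List Int)) (tl : List (String × List (Int × Int)))
    (d : PySem.Dict Int (List (Int × Int))) :
    tl.foldl (fun d p => p.2.foldl (pvStepA pf) d) d =
      (tl.flatMap (fun p => p.2)).foldl (pvStepA pf) d := by
  induction tl generalizing d with
  | nil => simp
  | cons p tl ih => simp [List.foldl_append, ih]

-- head of an insertion sort as a running minimum (strictly-less insertions keep the first minimum)
theorem pvHead_foldl_insertBy {α : Type} (bf : α → α → Bool) (xs : List α) :
    ∀ (h0 : α) (t0 : List α), ∃ t,
      xs.foldl (fun acc x => PySem.List.insertBy bf x acc) (h0 :: t0) =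
        (xs.foldl (fun b x => if bf x b then x else b) h0) :: t := by
  induction xs with
  | nil => intro h0 t0; exact ⟨t0, rfl⟩
  | cons x xs ih =>
    intro h0 t0
    simp only [List.foldl_cons]
    by_cases h : bf x h0 = true
    · simpa [PySem.List.insertBy, h] using ih x (h0 :: t0)
    · simpa [PySem.List.insertBy, h, Bool.not_eq_true] using
        ih h0 (PySem.List.insertBy bf x t0)

-- running y-minimum over an x-sorted list is the lexicographic (y, x) minimum
theorem pvFold_min_yx (s : List (Int × Int)) :
    ∀ (b : Int × Int), (b :: s).Pairwise (fun a c => a.1 ≤ c.1) →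
      (s.foldl (fun b x => if x.2 < b.2 then x else b) b) ∈ b :: s ∧
      ∀ p ∈ b :: s, pvLeYX (s.foldl (fun b x => if x.2 < b.2 then x else b) b) p := by
  induction s with
  | nil =>
    intro b _
    refine ⟨by simp, ?_⟩
    intro p hp
    simp only [List.foldl_nil]
    simp only [List.mem_singleton] at hp
    subst hp
    unfold pvLeYX; omega
  | cons x s ih =>
    intro b hpw
    have hbx : b.1 ≤ x.1 := (List.pairwise_cons.mp hpw).1 x List.mem_cons_self
    have hpw2 : ((if x.2 < b.2 then x else b) :: s).Pairwise (fun a c => a.1 ≤ c.1) := by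
      rcases List.pairwise_cons.mp hpw with ⟨hb, hxs⟩
      rcases List.pairwise_cons.mp hxs with ⟨hx, hs⟩
      by_cases h : x.2 < b.2
      · simpa [h] using List.pairwise_cons.mpr ⟨hx, hs⟩
      · rw [if_neg h]
        exact List.pairwise_cons.mpr ⟨fun c hc => hb c (List.mem_cons_of_mem _ hc), hs⟩
    obtain ⟨hmem, hmin⟩ := ih _ hpw2
    simp only [List.foldl_cons]
    have hsub : ∀ q, q ∈ (if x.2 < b.2 then x else b) :: s → q ∈ b :: x :: s := by
      intro q hq
      rcases List.mem_cons.mp hq with h | h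
      · by_cases hx2 : x.2 < b.2
        · rw [if_pos hx2] at h; simp [h]
        · rw [if_neg hx2] at h; simp [h]
      · simp [h]
    refine ⟨hsub _ hmem, ?_⟩
    intro p hp
    have hhead := hmin _ List.mem_cons_self
    have hdx : pvLeYX (if x.2 < b.2 then x else b) x ∧ pvLeYX (if x.2 < b.2 then x else b) b := by
      by_cases hx2 : x.2 < b.2
      · rw [if_pos hx2]; unfold pvLeYX; omega
      · rw [if_neg hx2]; unfold pvLeYX; omega
    rcases List.mem_cons.mp hp with h | h
    · subst h; unfold pvLeYX at hhead hdx ⊢; omega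
    · rcases List.mem_cons.mp h with h | h
      · subst h; unfold pvLeYX at hhead hdx ⊢; omega
      · exact hmin p (List.mem_cons_of_mem _ h)

-- B's running minimum is the lexicographic minimum of the candidate list
theorem pvFold_min3 (rest : List (Int × Int × Int)) :
    ∀ (b : Int × Int × Int),
      (rest.foldl (fun b c => if pvLt3 c b then c else b) b) ∈ b :: rest ∧
      ∀ c ∈ b :: rest, pvLe3 (rest.foldl (fun b c => if pvLt3 c b then c else b) b) c := by
  induction rest with
  | nil =>
    intro b
    refine ⟨by simp, ?_⟩
    intro c hc
    simp only [List.foldl_nil]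
    simp only [List.mem_singleton] at hc
    subst hc
    unfold pvLe3; omega
  | cons x rest ih =>
    intro b
    simp only [List.foldl_cons]
    obtain ⟨hmem, hmin⟩ := ih (if pvLt3 x b then x else b)
    have hsub : ∀ q, q ∈ (if pvLt3 x b then x else b) :: rest → q ∈ b :: x :: rest := by
      intro q hq
      rcases List.mem_cons.mp hq with h | h
      · by_cases hx : pvLt3 x b = true
        · rw [if_pos hx] at h; simp [h]
        · rw [if_neg hx] at h; simp [h]
      · simp [h]
    refine ⟨hsub _ hmem, ?_⟩
    intro c hc
    have hhead := hmin _ List.mem_cons_self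
    have hdx : pvLe3 (if pvLt3 x b then x else b) x ∧ pvLe3 (if pvLt3 x b then x else b) b := by
      by_cases hx : pvLt3 x b = true
      · rw [if_pos hx]
        unfold pvLt3 at hx; simp at hx
        unfold pvLe3; omega
      · rw [if_neg hx]
        unfold pvLt3 at hx; simp at hx
        unfold pvLe3; omega
    rcases List.mem_cons.mp hc with h | h
    · subst h; unfold pvLe3 at hhead hdx ⊢; omega
    · rcases List.mem_cons.mp h with h | h
      · subst h; unfold pvLe3 at hhead hdx ⊢; omega
      · exact hmin c (List.mem_cons_of_mem _ h)

-- ===== VERDICT (by name: the statement is the Claim_ definition above) =====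
theorem choose_target_spec : Claim_equal_choose_target := by
  intro pf tl hDom hPre
  unfold Spec_choose_target
  obtain ⟨hIdx, p0, hp0, hne0⟩ := hPre
  simp only [choose_target, choose_target_alt]
  rw [← List.map_flatMap]
  set trip : Int × Int → Int × Int × Int := fun loc => (pvDist pf loc, loc.2, loc.1) with htrip
  set cs := tl.flatMap (fun p => p.2) with hcs
  -- the flattened list of locations is nonempty
  have hcs_ne : cs ≠ [] := by
    obtain ⟨c, hc⟩ := List.exists_mem_of_ne_nil _ hne0
    intro hnil
    have : c ∈ cs := List.mem_flatMap.mpr ⟨p0, hp0, hc⟩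
    rw [hnil] at this
    exact absurd this (List.not_mem_nil)
  obtain ⟨c0, cs', hcse⟩ := List.exists_cons_of_ne_nil hcs_ne
  -- characterize A's grouping dict
  have hrl_keys : ∀ k, k ∈ (tl.foldl (fun d p => p.2.foldl (pvStepA pf) d) PySem.Dict.empty).keys
      ↔ k ∈ cs.map (pvDist pf) := by
    intro k
    rw [pvFoldA_flatten, pvFoldA_mem_keys]
    simp only [PySem.Dict.keys_empty, List.not_mem_nil, false_or]
    rw [hcs]
  have hrl_getD : ∀ k, (tl.foldl (fun d p => p.2.foldl (pvStepA pf) d) PySem.Dict.empty).getD k []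
      = cs.filter (fun c => decide (pvDist pf c = k)) := by
    intro k
    rw [pvFoldA_flatten, pvFoldA_getD]
    simp only [PySem.Dict.getD_empty, List.nil_append]
    rw [hcs]
  -- B's running minimum
  obtain ⟨hbmem, hbmin⟩ := pvFold_min3 (cs'.map trip) (trip c0)
  set best := (cs'.map trip).foldl (fun b c => if pvLt3 c b then c else b) (trip c0) with hbest
  have hmapcons : trip c0 :: cs'.map trip = cs.map trip := by rw [hcse, List.map_cons]
  rw [hmapcons] at hbmem hbmin
  obtain ⟨cb, hcb_mem, hcb_eq⟩ := List.mem_map.mp hbmem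
  -- A's min over the dict keys
  cases hmin : PySem.List.min? (tl.foldl (fun d p => p.2.foldl (pvStepA pf) d) PySem.Dict.empty).keys (fun k => k) with
  | none =>
    exfalso
    have := (PySem.List.min?_eq_none_iff _ _).mp hmin
    have hc0 : pvDist pf c0 ∈ cs.map (pvDist pf) := List.mem_map_of_mem (by rw [hcse]; exact List.mem_cons_self)
    rw [← hrl_keys, this] at hc0
    exact absurd hc0 (List.not_mem_nil)
  | some m =>
    have hm1 : m ∈ cs.map (pvDist pf) := (hrl_keys m).mp (PySem.List.min?_mem hmin)
    have hm2 : ∀ k ∈ cs.map (pvDist pf), m ≤ k := by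
      intro k hk
      exact PySem.List.min?_isMin hmin k ((hrl_keys k).mpr hk)
    -- m equals the first component of B's minimum
    have hm_best : m = best.1 := by
      have h1 : m ≤ best.1 := by
        have : best.1 = pvDist pf cb := by rw [← hcb_eq]
        rw [this]
        exact hm2 _ (List.mem_map_of_mem hcb_mem)
      have h2 : best.1 ≤ m := by
        obtain ⟨cm, hcm_mem, hcm_eq⟩ := List.mem_map.mp hm1
        have := hbmin (trip cm) (List.mem_map_of_mem hcm_mem)
        unfold pvLe3 at this
        simp only [htrip] at this
        omega
      omega
    rw [hcse, List.map_cons]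
    simp only []
    by_cases hlt : m < 10000000
    · rw [if_pos hlt, if_pos (by rw [← hm_best]; exact hlt)]
      -- A's group at the minimal distance
      rw [hrl_getD m]
      set g := cs.filter (fun c => decide (pvDist pf c = m)) with hg
      have hcb_dist : pvDist pf cb = m := by
        have : best.1 = pvDist pf cb := by rw [← hcb_eq]
        omega
      have hcb_g : cb ∈ g := List.mem_filter.mpr ⟨hcb_mem, by simp [hcb_dist]⟩
      have hg_ne : PySem.List.sorted g (fun p => p.1) false ≠ [] := by
        rw [Ne, PySem.List.sorted_eq_nil_iff]
        intro h
        rw [h] at hcb_g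
        exact absurd hcb_g (List.not_mem_nil)
      obtain ⟨q, qs, hs1⟩ := List.exists_cons_of_ne_nil hg_ne
      -- the head of the y-sort of the x-sorted group is the running y-minimum
      have hins : PySem.List.insertBy (fun a b => decide ((fun p : Int × Int => p.2) a < (fun p : Int × Int => p.2) b)) q [] = [q] := by
        simp [PySem.List.insertBy]
      have hfn : (fun (b x : Int × Int) => if (fun a b => decide ((fun p : Int × Int => p.2) a < (fun p : Int × Int => p.2) b)) x b = true then x else b)
          = (fun (b x : Int × Int) => if x.2 < b.2 then x else b) := by
        funext b x
        simp
      obtain ⟨t, ht⟩ := pvHead_foldl_insertBy (fun a b => decide ((fun p : Int × Int => p.2) a < (fun p : Int × Int => p.2) b)) qs q []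
      rw [hfn] at ht
      have hs2 : PySem.List.sorted (PySem.List.sorted g (fun p => p.1) false) (fun p => p.2) false
          = (qs.foldl (fun b x => if x.2 < b.2 then x else b) q) :: t := by
        rw [PySem.List.sorted_eq_foldl_insertBy, hs1, List.foldl_cons, hins, ht]
      rw [hs2]
      -- the head is the lexicographic (y, x) minimum of the group
      have hpw : (q :: qs).Pairwise (fun a c : Int × Int => a.1 ≤ c.1) := by
        have := PySem.List.sorted_pairwise g (fun p : Int × Int => p.1)
        rw [hs1] at this
        exact this
      obtain ⟨ho_mem, ho_min⟩ := pvFold_min_yx qs q hpw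
      set o := qs.foldl (fun b x => if x.2 < b.2 then x else b) q with ho
      have ho_g : o ∈ g := by
        have : o ∈ PySem.List.sorted g (fun p => p.1) false := by rw [hs1]; exact ho_mem
        exact (PySem.List.mem_sorted _ _ _ _).mp this
      have ho_cs : o ∈ cs := (List.mem_filter.mp ho_g).1
      have ho_dist : pvDist pf o = m := by
        have := (List.mem_filter.mp ho_g).2
        simpa using this
      have hcb_s1 : cb ∈ q :: qs := by
        rw [← hs1]
        exact (PySem.List.mem_sorted _ _ _ _).mpr hcb_g
      -- mutual minimality forces the two picks to coincide
      have h1 : pvLeYX o cb := ho_min cb hcb_s1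
      have h2 : pvLeYX cb o := by
        have := hbmin (trip o) (List.mem_map_of_mem ho_cs)
        rw [← hcb_eq] at this
        unfold pvLe3 at this
        simp only [htrip] at this
        unfold pvLeYX
        omega
      have : o = cb := by
        unfold pvLeYX at h1 h2
        exact Prod.ext (by omega) (by omega)
      show (some o.1, some o.2) = (some best.2.2, some best.2.1)
      rw [this, ← hcb_eq, htrip]
    · rw [if_neg hlt, if_neg (by rw [← hm_best]; exact hlt)]
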